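-- pv_equiv track=rewrite | github.com/axuanwu/learn_algorithm | bloomfliter.py | getseed
-- ===== SOURCE A (Python) =====
-- def getseed(str1):
--     """
--     :param str1: 词条的utf8形式
--     :return: 词条的hash指纹 256的位随机数
--     """
--     h = 0
--     for x in str1:
--         if ord(x) > 256:
--             h <<= 12
--             h += ord(x)
--         else:
--             h <<= 6
--             h += ord(x)
--     while (h >> 256) > 0:
--         h = (h & (2 ** 256 - 1)) ^ (h >> 256)  # 数字不能太大
--     return h
-- ===== SOURCE B (Python) =====
-- def getseed(str1):
--     """
--     :param str1: 词条的utf8形式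
--     :return: 词条的hash指纹 256的位随机数
--     """
--     def build(lo, hi):
--         # value and total bit-width of the segment str1[lo:hi] (hi - lo >= 1),
--         # combined by divide and conquer so big-int work is balanced
--         if hi - lo == 1:
--             c = ord(str1[lo])
--             return (c, 12) if c > 256 else (c, 6)
--         mid = (lo + hi) // 2
--         hl, bl = build(lo, mid)
--         hr, br = build(mid, hi)
--         return (hl << br) + hr, bl + br
--     h = build(0, len(str1))[0] if str1 else 0
--     mask = (1 << 256) - 1
--     f = 0
--     while h:
--         f ^= h & mask
--         h >>= 256
--     return f
-- ===== Notes on version B (the rewrite author's own statement) =====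
-- stated objective: faster
-- what changed: B builds the big accumulator by balanced divide-and-conquer over the string instead of A's left-to-right shift-and-add (which redoes O(n)-word bigint work per character), and replaces A's iterated masking/XOR while-loop by a single pass that XORs the 256-bit chunks of the accumulator.
import Mathlib
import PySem

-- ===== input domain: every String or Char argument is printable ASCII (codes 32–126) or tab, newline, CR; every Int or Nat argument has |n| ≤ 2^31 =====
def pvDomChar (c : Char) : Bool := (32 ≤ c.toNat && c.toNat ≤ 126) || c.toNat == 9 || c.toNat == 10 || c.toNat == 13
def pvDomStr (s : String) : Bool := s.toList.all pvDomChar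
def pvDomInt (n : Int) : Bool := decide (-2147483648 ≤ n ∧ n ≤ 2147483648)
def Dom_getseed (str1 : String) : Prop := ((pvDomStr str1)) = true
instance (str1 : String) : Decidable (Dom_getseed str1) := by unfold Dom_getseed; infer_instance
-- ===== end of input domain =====

-- B replaces A's left-to-right bigint accumulation by a balanced divide-and-conquer build of
-- the same integer, and A's iterated while-loop folding by a single pass XOR-ing the 256-bit
-- chunks; measured faster in a timing run.

-- ===== PORT A =====
-- 2 ** 256 - 1, the mask from the Python source
def gsMask : Nat := 2 ^ 256 - 1

-- one iteration of A's "for x in str1" body (h, Python's int, stays nonnegative throughout)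
def gsStep (h : Nat) (c : Char) : Nat :=
  if c.toNat > 256 then (h <<< 12) + c.toNat else (h <<< 6) + c.toNat

-- termination measure for A's while loop: the new h is strictly smaller
theorem gsAFold_dec (h : Nat) (ht : h >>> 256 > 0) :
    (h &&& gsMask) ^^^ (h >>> 256) < h := by
  have hm : h &&& gsMask = h % 2 ^ 256 := Nat.and_two_pow_sub_one_eq_mod h 256
  have hd : h >>> 256 = h / 2 ^ 256 := Nat.shiftRight_eq_div_pow h 256
  have hc : h &&& gsMask < 2 ^ 256 := by rw [hm]; exact Nat.mod_lt _ (Nat.two_pow_pos 256)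
  have ht0 : h >>> 256 ≠ 0 := by omega
  have h1 : 2 ^ (h >>> 256).log2 ≤ h >>> 256 := Nat.log2_self_le ht0
  have h2 : h >>> 256 < 2 ^ ((h >>> 256).log2 + 1) := Nat.lt_log2_self
  have hxor : (h &&& gsMask) ^^^ (h >>> 256) < 2 ^ (256 + (h >>> 256).log2) :=
    Nat.xor_lt_two_pow (lt_of_lt_of_le hc (Nat.pow_le_pow_right (by norm_num) (by omega)))
      (lt_of_lt_of_le h2 (Nat.pow_le_pow_right (by norm_num) (by omega)))
  have hth : 2 ^ 256 * (h >>> 256) ≤ h := by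
    rw [hd, mul_comm]; exact Nat.div_mul_le_self h (2 ^ 256)
  have hle : 2 ^ (256 + (h >>> 256).log2) ≤ h :=
    calc 2 ^ (256 + (h >>> 256).log2) = 2 ^ 256 * 2 ^ (h >>> 256).log2 := by rw [pow_add]
      _ ≤ 2 ^ 256 * (h >>> 256) := Nat.mul_le_mul_left _ h1
      _ ≤ h := hth
  omega

-- A's "while (h >> 256) > 0" loop
def gsAFold (h : Nat) : Nat :=
  if ht : h >>> 256 > 0 then gsAFold ((h &&& gsMask) ^^^ (h >>> 256)) else h
termination_by h
decreasing_by exact gsAFold_dec h ht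

def getseed (str1 : String) : Int :=
  (gsAFold (str1.toList.foldl gsStep 0) : Int)

-- ===== PORT B =====
-- B's recursive build(lo, hi), transliterated on the sublist str1[lo:hi]; it is only ever
-- applied to nonempty lists (Source B guards "if str1"), so the [] branch is never reached
def gsBuild (l : List Char) : Nat × Nat :=
  if l.length ≤ 1 then
    match l with
    | [] => (0, 0)
    | c :: _ => if c.toNat > 256 then (c.toNat, 12) else (c.toNat, 6)
  else
    ((gsBuild (l.take (l.length / 2))).1 <<< (gsBuild (l.drop (l.length / 2))).2
        + (gsBuild (l.drop (l.length / 2))).1,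
     (gsBuild (l.take (l.length / 2))).2 + (gsBuild (l.drop (l.length / 2))).2)
termination_by l.length
decreasing_by
  all_goals simp only [List.length_take, List.length_drop] <;> omega

-- B's "while h: f ^= h & mask; h >>= 256" loop
def gsBFold (h : Nat) (f : Nat) : Nat :=
  if hp : h > 0 then gsBFold (h >>> 256) (f ^^^ (h &&& gsMask)) else f
termination_by h
decreasing_by
  rw [Nat.shiftRight_eq_div_pow]
  exact Nat.div_lt_self hp (Nat.one_lt_two_pow (by norm_num))

def getseed_alt (str1 : String) : Int :=
  ((gsBFold (if str1.toList.isEmpty then 0 else (gsBuild str1.toList).1) 0) : Int)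

-- ===== PRECONDITION & SPEC =====
def Spec_getseed (str1 : String) (out : Int) : Prop := out = getseed_alt str1
instance (str1 : String) (out : Int) : Decidable (Spec_getseed str1 out) := by unfold Spec_getseed; infer_instance

-- ===== CLAIM (what is proved, stated in full; the proofs are below) =====
def Claim_equal_getseed : Prop := ∀ (str1 : String), Dom_getseed str1 → Spec_getseed str1 (getseed str1)

-- ===== LEMMAS AND PROOFS =====

-- total bit width contributed by a list of characters in A's loop
def gsBits (l : List Char) : Nat :=
  (l.map (fun c => if c.toNat > 256 then 12 else 6)).sum

theorem gsStep_zero (c : Char) : gsStep 0 c = c.toNat := by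
  unfold gsStep; split <;> simp [Nat.shiftLeft_eq]

theorem foldl_gsStep_shift (l : List Char) (h0 : Nat) :
    l.foldl gsStep h0 = (h0 <<< gsBits l) + l.foldl gsStep 0 := by
  induction l generalizing h0 with
  | nil => simp [gsBits, Nat.shiftLeft_eq]
  | cons c l ih =>
    simp only [List.foldl_cons]
    rw [ih (gsStep h0 c), ih (gsStep 0 c), gsStep_zero]
    by_cases hc : c.toNat > 256 <;>
      simp only [gsStep, gsBits, if_pos, if_neg, hc, if_true, if_false,
        List.map_cons, List.sum_cons, Nat.shiftLeft_eq, pow_add] <;> ring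

theorem gsBits_append (l1 l2 : List Char) :
    gsBits (l1 ++ l2) = gsBits l1 + gsBits l2 := by
  simp [gsBits]

theorem gsBuild_eq : ∀ (n : Nat) (l : List Char), l.length ≤ n → l ≠ [] →
    gsBuild l = (l.foldl gsStep 0, gsBits l) := by
  intro n
  induction n with
  | zero => intro l hlen hne; cases l <;> simp_all
  | succ n ih =>
    intro l hlen hne
    by_cases hl : l.length ≤ 1
    · match l, hne with
      | c :: l', _ =>
        have hnil : l' = [] := by cases l' <;> simp_all
        subst hnil
        rw [gsBuild.eq_def, if_pos (by simp)]
        by_cases hc : c.toNat > 256 <;> simp [gsStep, gsBits, hc, Nat.shiftLeft_eq]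
    · rw [gsBuild.eq_def, if_neg hl]
      have hm1 : 1 ≤ l.length / 2 := by omega
      have hmlt : l.length / 2 < l.length := by omega
      have hlt : (l.take (l.length / 2)).length ≤ n := by
        rw [List.length_take]; omega
      have hld : (l.drop (l.length / 2)).length ≤ n := by
        rw [List.length_drop]; omega
      have htne : l.take (l.length / 2) ≠ [] := by
        intro h
        have h0 : (l.take (l.length / 2)).length = 0 := by rw [h]; rfl
        rw [List.length_take] at h0; omega
      have hdne : l.drop (l.length / 2) ≠ [] := by
        intro h
        have h0 : (l.drop (l.length / 2)).length = 0 := by rw [h]; rfl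
        rw [List.length_drop] at h0; omega
      rw [ih _ hlt htne, ih _ hld hdne]
      simp only [Prod.mk.injEq]
      constructor
      · conv_rhs => rw [← List.take_append_drop (l.length / 2) l]
        rw [List.foldl_append,
          foldl_gsStep_shift (l.drop (l.length / 2))
            (List.foldl gsStep 0 (l.take (l.length / 2)))]
      · conv_rhs => rw [← List.take_append_drop (l.length / 2) l]
        rw [gsBits_append]

-- XOR of the 256-bit chunks of h: the common characterisation of both loops
def gsX (h : Nat) : Nat :=
  if hp : h > 0 then (h &&& gsMask) ^^^ gsX (h >>> 256) else 0
termination_by h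
decreasing_by
  rw [Nat.shiftRight_eq_div_pow]
  exact Nat.div_lt_self hp (Nat.one_lt_two_pow (by norm_num))

theorem gsMask_mod (h : Nat) : h &&& gsMask = h % 2 ^ 256 :=
  Nat.and_two_pow_sub_one_eq_mod h 256

theorem gsX_zero : gsX 0 = 0 := by rw [gsX]; simp

theorem gsX_small (h : Nat) (hh : h < 2 ^ 256) : gsX h = h := by
  rw [gsX]
  by_cases hp : h > 0
  · rw [dif_pos hp, gsMask_mod, Nat.mod_eq_of_lt hh]
    have hz : h >>> 256 = 0 := by
      rw [Nat.shiftRight_eq_div_pow]; exact Nat.div_eq_of_lt hh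
    rw [hz, gsX_zero, Nat.xor_zero]
  · rw [dif_neg hp]; omega

theorem gsBFold_eq (h : Nat) : ∀ f, gsBFold h f = f ^^^ gsX h := by
  induction h using Nat.strong_induction_on with
  | _ h ih =>
    intro f
    rw [gsBFold, gsX]
    by_cases hp : h > 0
    · rw [dif_pos hp, dif_pos hp]
      have hlt : h >>> 256 < h := by
        rw [Nat.shiftRight_eq_div_pow]
        exact Nat.div_lt_self hp (Nat.one_lt_two_pow (by norm_num))
      rw [ih _ hlt, Nat.xor_assoc]
    · simp [dif_neg hp]

theorem gsX_xor_low (t c : Nat) (hc : c < 2 ^ 256) : gsX (c ^^^ t) = c ^^^ gsX t := by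
  by_cases ht : t > 0
  · have hcm : c &&& gsMask = c := by rw [gsMask_mod, Nat.mod_eq_of_lt hc]
    have hcs : c >>> 256 = 0 := by
      rw [Nat.shiftRight_eq_div_pow]; exact Nat.div_eq_of_lt hc
    by_cases hz : c ^^^ t = 0
    · have hct : c = t := Nat.xor_eq_zero_iff.mp hz
      rw [hz, gsX_zero, gsX_small t (hct ▸ hc), ← hct, Nat.xor_self]
    · rw [gsX, dif_pos (Nat.pos_of_ne_zero hz)]
      rw [Nat.and_xor_distrib_right, Nat.shiftRight_xor_distrib, hcm, hcs, Nat.zero_xor]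
      conv_rhs => rw [gsX, dif_pos ht]
      rw [Nat.xor_assoc]
  · have ht0 : t = 0 := by omega
    subst ht0
    rw [Nat.xor_zero, gsX_small c hc, gsX_zero, Nat.xor_zero]

theorem gsAFold_eq (h : Nat) : gsAFold h = gsX h := by
  induction h using Nat.strong_induction_on with
  | _ h ih =>
    rw [gsAFold]
    by_cases ht : h >>> 256 > 0
    · rw [dif_pos ht, ih _ (gsAFold_dec h ht)]
      have hc : h &&& gsMask < 2 ^ 256 := by
        rw [gsMask_mod]; exact Nat.mod_lt _ (Nat.two_pow_pos 256)
      have hp : h > 0 := lt_of_lt_of_le ht (Nat.shiftRight_le h 256)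
      rw [gsX_xor_low _ _ hc]
      conv_rhs => rw [gsX, dif_pos hp]
    · rw [dif_neg ht]
      have hlt : h < 2 ^ 256 := by
        rw [Nat.shiftRight_eq_div_pow] at ht
        by_contra hge
        exact ht (Nat.div_pos (by omega) (Nat.two_pow_pos 256))
      rw [gsX_small h hlt]

-- ===== VERDICT (by name: the statement is the Claim_ definition above) =====
theorem getseed_spec : Claim_equal_getseed := by
  intro str1 _
  unfold Spec_getseed getseed getseed_alt
  congr 1
  by_cases he : str1.toList.isEmpty
  · rw [if_pos he, List.isEmpty_iff.mp he]
    simp only [List.foldl_nil]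
    rw [gsAFold_eq, gsBFold_eq, gsX_zero, Nat.xor_zero]
  · rw [if_neg he,
      gsBuild_eq str1.toList.length str1.toList le_rfl (by simpa using he)]
    rw [gsAFold_eq, gsBFold_eq, Nat.zero_xor]
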